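-- pv_equiv track=rewrite | github.com/nightmare224/url-shortner | flaskr/shortner.py | generateShortId
-- ===== SOURCE A (Python) =====
-- def generateShortId(UrlId):
--     BASE_62_VALUES = "abcdefghijklmnopqrstuvwxyzABCDEFGHIJKLMNOPQRSTUVWXYZ0123456789"
--     shortUrlId = ""
--     base = 62
--     while UrlId > 0:
--         r = UrlId % base
--         shortUrlId += BASE_62_VALUES[r]
--         UrlId //= base
--     return shortUrlId[len(shortUrlId) :: -1]
-- ===== SOURCE B (Python) =====
-- def generateShortId(UrlId):
--     BASE_62_VALUES = "abcdefghijklmnopqrstuvwxyzABCDEFGHIJKLMNOPQRSTUVWXYZ0123456789"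
--     if UrlId <= 0:
--         return ""
--     return generateShortId(UrlId // 62) + BASE_62_VALUES[UrlId % 62]
-- ===== Notes on version B (the rewrite author's own statement) =====
-- stated objective: simpler
-- what changed: Replaced the iterative digit-accumulation loop (which builds the string least-significant-first and then reverses it with a slice) by a direct recursion on the quotient that emits the most-significant digit first, so no reversal step is needed.
import Mathlib
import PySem

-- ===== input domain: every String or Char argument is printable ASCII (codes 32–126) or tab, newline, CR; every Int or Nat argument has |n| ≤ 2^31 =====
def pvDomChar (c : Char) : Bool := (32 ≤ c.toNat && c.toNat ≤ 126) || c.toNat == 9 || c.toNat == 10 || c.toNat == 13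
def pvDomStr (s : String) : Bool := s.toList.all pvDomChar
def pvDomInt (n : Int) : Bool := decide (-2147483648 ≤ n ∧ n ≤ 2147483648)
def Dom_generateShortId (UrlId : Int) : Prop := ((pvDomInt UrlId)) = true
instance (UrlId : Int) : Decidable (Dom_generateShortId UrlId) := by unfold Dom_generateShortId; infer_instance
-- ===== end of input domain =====

-- B prepends via recursion (most-significant digit first), so A's reversal slice disappears.

-- shared alphabet constant (the same string literal both Pythons use)
def pvBase62 : List Char := "abcdefghijklmnopqrstuvwxyzABCDEFGHIJKLMNOPQRSTUVWXYZ0123456789".toList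

-- termination fact for both ports, cited by name in decreasing_by
theorem pvFloordiv62_lt (n : Int) (h : 0 < n) :
    (PySem.Int.floordiv n 62).toNat < n.toNat := by
  rw [PySem.Int.floordiv_eq_ediv_of_pos (by omega)]
  omega

-- ===== PORT A =====
-- the while-loop: state is (UrlId, shortUrlId); shortUrlId grows at the end
def genLoopA (UrlId : Int) (shortUrlId : List Char) : List Char :=
  if h : UrlId > 0 then
    let r := PySem.Int.mod UrlId 62
    genLoopA (PySem.Int.floordiv UrlId 62)
      (shortUrlId ++ [(PySem.List.pyGet? pvBase62 r).getD 'a'])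
  else shortUrlId
termination_by UrlId.toNat
decreasing_by exact pvFloordiv62_lt _ h

def generateShortId (UrlId : Int) : String :=
  let s := genLoopA UrlId []
  -- shortUrlId[len(shortUrlId) :: -1]
  String.ofList ((PySem.List.slice? s (some (s.length : Int)) none (-1)).getD [])

-- ===== PORT B =====
def genRecB (UrlId : Int) : List Char :=
  if h : UrlId ≤ 0 then []
  else genRecB (PySem.Int.floordiv UrlId 62)
        ++ [(PySem.List.pyGet? pvBase62 (PySem.Int.mod UrlId 62)).getD 'a']
termination_by UrlId.toNat
decreasing_by exact pvFloordiv62_lt _ (by omega)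

def generateShortId_alt (UrlId : Int) : String := String.ofList (genRecB UrlId)

-- ===== PRECONDITION & SPEC =====
def Spec_generateShortId (UrlId : Int) (out : String) : Prop := out = generateShortId_alt UrlId
instance (UrlId : Int) (out : String) : Decidable (Spec_generateShortId UrlId out) := by unfold Spec_generateShortId; infer_instance

-- ===== CLAIM (what is proved, stated in full; the proofs are below) =====
def Claim_equal_generateShortId : Prop := ∀ (UrlId : Int), Dom_generateShortId UrlId → Spec_generateShortId UrlId (generateShortId UrlId)

-- ===== LEMMAS AND PROOFS =====

-- the loop computes acc ++ reverse of B's digits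
theorem genLoopA_eq (UrlId : Int) (acc : List Char) :
    genLoopA UrlId acc = acc ++ (genRecB UrlId).reverse := by
  induction UrlId, acc using genLoopA.induct with
  | case1 n acc h r ih =>
    rw [genLoopA, dif_pos h, ih]
    conv_rhs => rw [genRecB]
    rw [dif_neg (by omega : ¬ n ≤ 0)]
    simp only [List.reverse_append, List.reverse_singleton, List.append_assoc,
      List.singleton_append]
    rfl
  | case2 n acc h =>
    rw [genLoopA, dif_neg h, genRecB, dif_pos (by omega)]
    simp

theorem slice_rev (xs : List Char) :
    PySem.List.slice? xs (some (xs.length : Int)) none (-1) = some xs.reverse := by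
  rw [← PySem.List.slice?_none_none_neg_one]
  have h1 : ¬ ((xs.length : Int) < 0) := by omega
  simp [PySem.List.slice?, PySem.List.sliceIndices, h1]

-- ===== VERDICT (by name: the statement is the Claim_ definition above) =====
theorem generateShortId_spec : Claim_equal_generateShortId := by
  intro UrlId _
  unfold Spec_generateShortId generateShortId generateShortId_alt
  rw [genLoopA_eq, List.nil_append]
  show String.ofList ((PySem.List.slice? ((genRecB UrlId).reverse)
      (some (((genRecB UrlId).reverse).length : Int)) none (-1)).getD []) =
    String.ofList (genRecB UrlId)
  rw [slice_rev, Option.getD_some, List.reverse_reverse]
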